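-- pv_equiv track=rewrite | github.com/Atvo/SnakeAI | main.py | get_ray
-- ===== SOURCE A (Python) =====
-- def get_ray(ray_dir, snake_obj, width, height):
-- 	ray = []
-- 	tmp_x = snake_obj[0][0]
-- 	tmp_y = snake_obj[0][1]
-- 	if ray_dir == "left":
-- 		while tmp_x >= 0:
-- 			ray.append([tmp_x, tmp_y])
-- 			tmp_x -= 1
-- 	if ray_dir == "upleft":
-- 		while tmp_x >= 0 and tmp_y >= 0:
-- 			ray.append([tmp_x, tmp_y])
-- 			tmp_x -= 1
-- 			tmp_y -= 1
-- 	if ray_dir == "up":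
-- 		while tmp_y >= 0:
-- 			ray.append([tmp_x, tmp_y])
-- 			tmp_y -= 1
-- 	if ray_dir == "upright":
-- 		while tmp_x < width and tmp_y >= 0:
-- 			ray.append([tmp_x, tmp_y])
-- 			tmp_x += 1
-- 			tmp_y -= 1
-- 	if ray_dir == "right":
-- 		while tmp_x < width:
-- 			ray.append([tmp_x, tmp_y])
-- 			tmp_x += 1
-- 	if ray_dir == "downright":
-- 		while tmp_x < width and tmp_y < height:
-- 			ray.append([tmp_x, tmp_y])
-- 			tmp_x += 1
-- 			tmp_y += 1
-- 	if ray_dir == "down":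
-- 		while tmp_y < height:
-- 			ray.append([tmp_x, tmp_y])
-- 			tmp_y += 1
-- 	if ray_dir == "downleft":
-- 		while tmp_x >= 0 and tmp_y < height:
-- 			ray.append([tmp_x, tmp_y])
-- 			tmp_x -= 1
-- 			tmp_y += 1
--
-- 	if len(ray) == 0:
-- 		return None
--
-- 	del ray[0]
-- 	return ray
-- ===== SOURCE B (Python) =====
-- _DELTAS = {
--     "left": (-1, 0), "upleft": (-1, -1), "up": (0, -1), "upright": (1, -1),
--     "right": (1, 0), "downright": (1, 1), "down": (0, 1), "downleft": (-1, 1),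
-- }
--
-- def _span(v, d, limit):
--     # number of in-bounds cells from v along step d; None means unbounded (d == 0)
--     if d < 0:
--         return v + 1
--     if d > 0:
--         return limit - v
--     return None
--
-- def get_ray(ray_dir, snake_obj, width, height):
--     x = snake_obj[0][0]
--     y = snake_obj[0][1]
--     step = _DELTAS.get(ray_dir)
--     if step is None:
--         return None
--     dx, dy = step
--     sx = _span(x, dx, width)
--     sy = _span(y, dy, height)
--     if sx is None:
--         m = sy
--     elif sy is None:
--         m = sx
--     else:
--         m = min(sx, sy)
--     n = max(0, m)
--     if n == 0:
--         return None
--     return [[x + i * dx, y + i * dy] for i in range(1, n)]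
-- ===== Notes on version B (the rewrite author's own statement) =====
-- stated objective: alternative
-- what changed: Instead of stepping cell by cell in a while-loop, B computes the ray length in closed form (min of the arithmetic distances to the boundaries along each moving axis) and builds the result directly as a comprehension over range(1, n), with no stepping loop, no append and no del.
import Mathlib
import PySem

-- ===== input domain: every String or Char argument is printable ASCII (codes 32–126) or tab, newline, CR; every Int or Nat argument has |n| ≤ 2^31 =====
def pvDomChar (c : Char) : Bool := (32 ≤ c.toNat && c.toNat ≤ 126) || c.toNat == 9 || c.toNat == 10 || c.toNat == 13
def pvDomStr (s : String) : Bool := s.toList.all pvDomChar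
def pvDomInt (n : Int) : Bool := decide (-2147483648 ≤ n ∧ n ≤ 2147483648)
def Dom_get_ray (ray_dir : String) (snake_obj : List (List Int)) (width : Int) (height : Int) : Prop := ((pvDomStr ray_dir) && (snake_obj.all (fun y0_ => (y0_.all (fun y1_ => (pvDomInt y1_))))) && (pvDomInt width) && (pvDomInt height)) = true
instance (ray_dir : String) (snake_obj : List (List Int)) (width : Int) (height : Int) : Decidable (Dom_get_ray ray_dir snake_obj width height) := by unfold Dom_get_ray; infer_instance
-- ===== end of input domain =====

-- B replaces A's eight cell-by-cell stepping while-loops by a closed-form ray length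
-- (min of the arithmetic distances to the boundaries) plus a range comprehension
-- (objective: alternative; same cost).

-- ===== PORT A =====
-- measure lemmas cited by the loops' decreasing_by (hoisted: keeps the loop definitions small)
theorem decSub (x : Int) (h : 0 ≤ x) : (x - 1 + 1).toNat < (x + 1).toNat := by omega
theorem decAdd (a x : Int) (h : x < a) : (a - (x + 1)).toNat < (a - x).toNat := by omega

-- one helper per while-loop of A, each a literal transcription of that loop
def loopLeft (x y : Int) (acc : List (List Int)) : List (List Int) :=
  if h : 0 ≤ x then loopLeft (x - 1) y (acc ++ [[x, y]]) else acc
termination_by (x + 1).toNat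
decreasing_by exact decSub x h

def loopUpLeft (x y : Int) (acc : List (List Int)) : List (List Int) :=
  if h : 0 ≤ x ∧ 0 ≤ y then loopUpLeft (x - 1) (y - 1) (acc ++ [[x, y]]) else acc
termination_by (x + 1).toNat
decreasing_by exact decSub x h.1

def loopUp (x y : Int) (acc : List (List Int)) : List (List Int) :=
  if h : 0 ≤ y then loopUp x (y - 1) (acc ++ [[x, y]]) else acc
termination_by (y + 1).toNat
decreasing_by exact decSub y h

def loopUpRight (width : Int) (x y : Int) (acc : List (List Int)) : List (List Int) :=
  if h : x < width ∧ 0 ≤ y then loopUpRight width (x + 1) (y - 1) (acc ++ [[x, y]]) else acc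
termination_by (y + 1).toNat
decreasing_by exact decSub y h.2

def loopRight (width : Int) (x y : Int) (acc : List (List Int)) : List (List Int) :=
  if h : x < width then loopRight width (x + 1) y (acc ++ [[x, y]]) else acc
termination_by (width - x).toNat
decreasing_by exact decAdd width x h

def loopDownRight (width height : Int) (x y : Int) (acc : List (List Int)) : List (List Int) :=
  if h : x < width ∧ y < height then loopDownRight width height (x + 1) (y + 1) (acc ++ [[x, y]]) else acc
termination_by (width - x).toNat
decreasing_by exact decAdd width x h.1

def loopDown (height : Int) (x y : Int) (acc : List (List Int)) : List (List Int) :=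
  if h : y < height then loopDown height x (y + 1) (acc ++ [[x, y]]) else acc
termination_by (height - y).toNat
decreasing_by exact decAdd height y h

def loopDownLeft (height : Int) (x y : Int) (acc : List (List Int)) : List (List Int) :=
  if h : 0 ≤ x ∧ y < height then loopDownLeft height (x - 1) (y + 1) (acc ++ [[x, y]]) else acc
termination_by (x + 1).toNat
decreasing_by exact decSub x h.1

-- A's sequential 'if ray_dir == …' tests are mutually exclusive string comparisons, so the
-- chain below is an exact transcription; the '.getD' defaults are only reached outside Pre_.
def get_ray (ray_dir : String) (snake_obj : List (List Int)) (width : Int) (height : Int) : Option (List (List Int)) :=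
  let head := (PySem.List.pyGet? snake_obj 0).getD []
  let tmp_x := (PySem.List.pyGet? head 0).getD 0
  let tmp_y := (PySem.List.pyGet? head 1).getD 0
  let ray : List (List Int) :=
    if ray_dir = "left" then loopLeft tmp_x tmp_y []
    else if ray_dir = "upleft" then loopUpLeft tmp_x tmp_y []
    else if ray_dir = "up" then loopUp tmp_x tmp_y []
    else if ray_dir = "upright" then loopUpRight width tmp_x tmp_y []
    else if ray_dir = "right" then loopRight width tmp_x tmp_y []
    else if ray_dir = "downright" then loopDownRight width height tmp_x tmp_y []
    else if ray_dir = "down" then loopDown height tmp_x tmp_y []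
    else if ray_dir = "downleft" then loopDownLeft height tmp_x tmp_y []
    else []
  if ray = [] then none else some (ray.drop 1)  -- del ray[0]

-- ===== PORT B =====
def deltaDict : PySem.Dict String (Int × Int) :=
  PySem.Dict.ofList [("left", (-1, 0)), ("upleft", (-1, -1)), ("up", (0, -1)),
    ("upright", (1, -1)), ("right", (1, 0)), ("downright", (1, 1)),
    ("down", (0, 1)), ("downleft", (-1, 1))]

-- port of Source B's _span: number of in-bounds cells from v along step d; none = unbounded
def span (v d limit : Int) : Option Int :=
  if d < 0 then some (v + 1) else if 0 < d then some (limit - v) else none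

def get_ray_alt (ray_dir : String) (snake_obj : List (List Int)) (width : Int) (height : Int) : Option (List (List Int)) :=
  let head := (PySem.List.pyGet? snake_obj 0).getD []
  let x := (PySem.List.pyGet? head 0).getD 0
  let y := (PySem.List.pyGet? head 1).getD 0
  match deltaDict.get? ray_dir with
  | none => none
  | some (dx, dy) =>
    -- the 'none, none' case is unreachable (the dict never supplies (0,0)); Source B would
    -- leave m unbound there, so returning none only totalizes the Lean port
    match span x dx width, span y dy height with
    | none, none => none
    | none, some sy => finish x y dx dy sy
    | some sx, none => finish x y dx dy sx
    | some sx, some sy => finish x y dx dy (min sx sy)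
where
  finish (x y dx dy m : Int) : Option (List (List Int)) :=
    let n := max 0 m
    if n = 0 then none
    else some ((PySem.List.pyRange 1 n 1).map (fun i => [x + i * dx, y + i * dy]))

-- ===== PRECONDITION & SPEC =====
-- Pre_ excludes exactly the inputs where Python A raises IndexError: an empty snake_obj or
-- a head segment with fewer than two coordinates.
def Pre_get_ray (ray_dir : String) (snake_obj : List (List Int)) (width : Int) (height : Int) : Prop :=
  snake_obj ≠ [] ∧ 2 ≤ snake_obj.headI.length
instance (ray_dir : String) (snake_obj : List (List Int)) (width : Int) (height : Int) : Decidable (Pre_get_ray ray_dir snake_obj width height) := by unfold Pre_get_ray; infer_instance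

def pvWitness_get_ray : String × List (List Int) × Int × Int := ("left", [[2, 1]], 4, 4)

def Spec_get_ray (ray_dir : String) (snake_obj : List (List Int)) (width : Int) (height : Int) (out : Option (List (List Int))) : Prop := out = get_ray_alt ray_dir snake_obj width height
instance (ray_dir : String) (snake_obj : List (List Int)) (width : Int) (height : Int) (out : Option (List (List Int))) : Decidable (Spec_get_ray ray_dir snake_obj width height out) := by unfold Spec_get_ray; infer_instance

-- ===== CLAIM (what is proved, stated in full; the proofs are below) =====
def Claim_equal_get_ray : Prop := ∀ (ray_dir : String) (snake_obj : List (List Int)) (width : Int) (height : Int), Dom_get_ray ray_dir snake_obj width height → Pre_get_ray ray_dir snake_obj width height → Spec_get_ray ray_dir snake_obj width height (get_ray ray_dir snake_obj width height)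

-- ===== LEMMAS AND PROOFS =====
-- the sequence of cells A's loop visits, characterized by its length
def cells (x y dx dy : Int) : Nat → List (List Int) :=
  fun n => (List.range n).map (fun k : Nat => [x + (k : Int) * dx, y + (k : Int) * dy])

theorem cells_succ (x y dx dy x' y' : Int) (hx : x' = x + dx) (hy : y' = y + dy) (m : Nat) :
    cells x y dx dy (m + 1) = [x, y] :: cells x' y' dx dy m := by
  unfold cells
  rw [List.range_succ_eq_map, List.map_cons, List.map_map]
  subst hx hy
  congr 1
  · norm_num
  · apply List.map_congr_left; intro k _
    simp only [Function.comp_apply, List.cons.injEq, and_true]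
    push_cast
    exact ⟨by ring, by ring⟩

-- each of A's loops produces exactly 'cells' of the closed-form length
theorem loopLeft_cells (x y : Int) (acc : List (List Int)) :
    loopLeft x y acc = acc ++ cells x y (-1) 0 (x + 1).toNat := by
  fun_induction loopLeft x y acc with
  | case1 x acc hx ih =>
      rw [ih, show (x + 1).toNat = (x - 1 + 1).toNat + 1 by omega,
        cells_succ x _ _ _ (x - 1) _ (by ring) (by ring)]
      simp
  | case2 x acc hx => rw [show (x + 1).toNat = 0 by omega]; simp [cells]

theorem loopUpLeft_cells (x y : Int) (acc : List (List Int)) :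
    loopUpLeft x y acc = acc ++ cells x y (-1) (-1) (min (x + 1) (y + 1)).toNat := by
  fun_induction loopUpLeft x y acc with
  | case1 x y acc hc ih =>
      rw [ih, show (min (x + 1) (y + 1)).toNat = (min (x - 1 + 1) (y - 1 + 1)).toNat + 1 by omega,
        cells_succ x y _ _ (x - 1) (y - 1) (by ring) (by ring)]
      simp
  | case2 x y acc hc =>
      rw [show (min (x + 1) (y + 1)).toNat = 0 by omega]; simp [cells]

theorem loopUp_cells (x y : Int) (acc : List (List Int)) :
    loopUp x y acc = acc ++ cells x y 0 (-1) (y + 1).toNat := by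
  fun_induction loopUp x y acc with
  | case1 y acc hy ih =>
      rw [ih, show (y + 1).toNat = (y - 1 + 1).toNat + 1 by omega,
        cells_succ _ y _ _ _ (y - 1) (by ring) (by ring)]
      simp
  | case2 y acc hy => rw [show (y + 1).toNat = 0 by omega]; simp [cells]

theorem loopUpRight_cells (w x y : Int) (acc : List (List Int)) :
    loopUpRight w x y acc = acc ++ cells x y 1 (-1) (min (w - x) (y + 1)).toNat := by
  fun_induction loopUpRight w x y acc with
  | case1 x y acc hc ih =>
      rw [ih, show (min (w - x) (y + 1)).toNat = (min (w - (x + 1)) (y - 1 + 1)).toNat + 1 by omega,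
        cells_succ x y _ _ (x + 1) (y - 1) (by ring) (by ring)]
      simp
  | case2 x y acc hc =>
      rw [show (min (w - x) (y + 1)).toNat = 0 by omega]; simp [cells]

theorem loopRight_cells (w x y : Int) (acc : List (List Int)) :
    loopRight w x y acc = acc ++ cells x y 1 0 (w - x).toNat := by
  fun_induction loopRight w x y acc with
  | case1 x acc hx ih =>
      rw [ih, show (w - x).toNat = (w - (x + 1)).toNat + 1 by omega,
        cells_succ x _ _ _ (x + 1) _ (by ring) (by ring)]
      simp
  | case2 x acc hx => rw [show (w - x).toNat = 0 by omega]; simp [cells]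

theorem loopDownRight_cells (w h x y : Int) (acc : List (List Int)) :
    loopDownRight w h x y acc = acc ++ cells x y 1 1 (min (w - x) (h - y)).toNat := by
  fun_induction loopDownRight w h x y acc with
  | case1 x y acc hc ih =>
      rw [ih, show (min (w - x) (h - y)).toNat = (min (w - (x + 1)) (h - (y + 1))).toNat + 1 by omega,
        cells_succ x y _ _ (x + 1) (y + 1) (by ring) (by ring)]
      simp
  | case2 x y acc hc =>
      rw [show (min (w - x) (h - y)).toNat = 0 by omega]; simp [cells]

theorem loopDown_cells (h x y : Int) (acc : List (List Int)) :
    loopDown h x y acc = acc ++ cells x y 0 1 (h - y).toNat := by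
  fun_induction loopDown h x y acc with
  | case1 y acc hy ih =>
      rw [ih, show (h - y).toNat = (h - (y + 1)).toNat + 1 by omega,
        cells_succ _ y _ _ _ (y + 1) (by ring) (by ring)]
      simp
  | case2 y acc hy => rw [show (h - y).toNat = 0 by omega]; simp [cells]

theorem loopDownLeft_cells (h x y : Int) (acc : List (List Int)) :
    loopDownLeft h x y acc = acc ++ cells x y (-1) 1 (min (x + 1) (h - y)).toNat := by
  fun_induction loopDownLeft h x y acc with
  | case1 x y acc hc ih =>
      rw [ih, show (min (x + 1) (h - y)).toNat = (min (x - 1 + 1) (h - (y + 1))).toNat + 1 by omega,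
        cells_succ x y _ _ (x - 1) (y + 1) (by ring) (by ring)]
      simp
  | case2 x y acc hc =>
      rw [show (min (x + 1) (h - y)).toNat = 0 by omega]; simp [cells]

-- A's empty-test + del of the head of 'cells m.toNat' equals B's finish on m
theorem finish_cells (x y dx dy m : Int) :
    (if cells x y dx dy m.toNat = [] then none
     else some ((cells x y dx dy m.toNat).tail))
    = get_ray_alt.finish x y dx dy m := by
  unfold get_ray_alt.finish
  by_cases hm : m ≤ 0
  · rw [show m.toNat = 0 by omega, max_eq_left hm]; simp [cells]
  · have h1 : max 0 m = m := max_eq_right (by omega)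
    have h2 : cells x y dx dy m.toNat ≠ [] := by
      simp [cells]; omega
    rw [h1, if_neg h2, if_neg (by omega : ¬ m = 0)]
    congr 1
    rw [PySem.List.pyRange_one, List.map_map,
      show m.toNat = (m - 1).toNat + 1 by omega]
    unfold cells
    rw [List.range_succ_eq_map, List.map_cons, List.tail_cons, List.map_map]
    apply List.map_congr_left; intro k _
    simp only [Function.comp_apply, List.cons.injEq, and_true]
    push_cast
    exact ⟨by ring, by ring⟩

-- ===== VERDICT (by name: the statement is the Claim_ definition above) =====
theorem get_ray_spec : Claim_equal_get_ray := by
  intro ray_dir snake_obj width height _dom _pre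
  unfold Spec_get_ray get_ray get_ray_alt
  by_cases h1 : ray_dir = "left"
  · simp only [h1]
    rw [show deltaDict.get? "left" = some (-1, 0) from by decide]
    simp [loopLeft_cells, span]
    exact finish_cells _ _ _ _ _
  by_cases h2 : ray_dir = "upleft"
  · simp only [h2]
    rw [show deltaDict.get? "upleft" = some (-1, -1) from by decide]
    simp [loopUpLeft_cells, span]
    exact finish_cells _ _ _ _ _
  by_cases h3 : ray_dir = "up"
  · simp only [h3]
    rw [show deltaDict.get? "up" = some (0, -1) from by decide]
    simp [loopUp_cells, span]
    exact finish_cells _ _ _ _ _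
  by_cases h4 : ray_dir = "upright"
  · simp only [h4]
    rw [show deltaDict.get? "upright" = some (1, -1) from by decide]
    simp [loopUpRight_cells, span]
    exact finish_cells _ _ _ _ _
  by_cases h5 : ray_dir = "right"
  · simp only [h5]
    rw [show deltaDict.get? "right" = some (1, 0) from by decide]
    simp [loopRight_cells, span]
    exact finish_cells _ _ _ _ _
  by_cases h6 : ray_dir = "downright"
  · simp only [h6]
    rw [show deltaDict.get? "downright" = some (1, 1) from by decide]
    simp [loopDownRight_cells, span]
    exact finish_cells _ _ _ _ _
  by_cases h7 : ray_dir = "down"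
  · simp only [h7]
    rw [show deltaDict.get? "down" = some (0, 1) from by decide]
    simp [loopDown_cells, span]
    exact finish_cells _ _ _ _ _
  by_cases h8 : ray_dir = "downleft"
  · simp only [h8]
    rw [show deltaDict.get? "downleft" = some (-1, 1) from by decide]
    simp [loopDownLeft_cells, span]
    exact finish_cells _ _ _ _ _
  · have e : deltaDict.get? ray_dir = none := by
      simp [deltaDict, PySem.Dict.ofList, PySem.Dict.get?, PySem.Dict.update,
        PySem.Dict.insert, PySem.Dict.empty, Ne.symm h1, Ne.symm h2, Ne.symm h3,
        Ne.symm h4, Ne.symm h5, Ne.symm h6, Ne.symm h7, Ne.symm h8]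
    simp [h1, h2, h3, h4, h5, h6, h7, h8, e]
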